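-- pv_equiv track=rewrite | github.com/daniel-reich/ubiquitous-fiesta | ysgbRFTPujx8v37yF_15.py | row_sum
-- ===== SOURCE A (Python) =====
-- def row_sum(n):
--   cur = 1
--   row = 0
--   length = 1
--   for i in range(n):
--     row = sum(range(cur,cur+length))
--     cur+=length
--     length+=1
--   return row
-- ===== SOURCE B (Python) =====
-- def row_sum(n):
--   if n <= 0:
--     return 0
--   return n * (n * n + 1) // 2
-- ===== Notes on version B (the rewrite author's own statement) =====
-- stated objective: faster
-- what changed: replaced the loop that rebuilds every row's start and sums its integers with the closed-form formula n*(n^2+1)//2 (0 for n<=0)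
import Mathlib
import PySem

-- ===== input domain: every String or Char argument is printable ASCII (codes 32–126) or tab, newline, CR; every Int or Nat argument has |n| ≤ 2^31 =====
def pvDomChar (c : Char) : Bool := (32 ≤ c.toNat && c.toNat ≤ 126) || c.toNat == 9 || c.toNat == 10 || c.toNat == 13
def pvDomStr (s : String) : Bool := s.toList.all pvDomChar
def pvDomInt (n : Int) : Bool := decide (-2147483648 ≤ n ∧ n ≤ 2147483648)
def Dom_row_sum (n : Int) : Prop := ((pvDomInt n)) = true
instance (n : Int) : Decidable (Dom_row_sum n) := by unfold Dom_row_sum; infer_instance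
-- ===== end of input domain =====

-- B replaces A's O(n^2) loop (rebuilding each row and summing it) with the closed-form n*(n^2+1)//2.

-- ===== PORT A =====
-- literal port of A: state (cur, row, length), one fold step per loop iteration;
-- sum(range(cur, cur+length)) is (pyRange cur (cur+length) 1).sum
def row_sum (n : Int) : Int :=
  let t := (PySem.List.pyRange 0 n 1).foldl
    (fun (s : Int × Int × Int) (_i : Int) =>
      let cur := s.1; let length := s.2.2
      (cur + length, (PySem.List.pyRange cur (cur + length) 1).sum, length + 1))
    (1, 0, 1)
  t.2.1

-- ===== PORT B =====
def row_sum_alt (n : Int) : Int :=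
  if n ≤ 0 then 0 else PySem.Int.floordiv (n * (n * n + 1)) 2

-- ===== PRECONDITION & SPEC =====
def Spec_row_sum (n : Int) (out : Int) : Prop := out = row_sum_alt n
instance (n : Int) (out : Int) : Decidable (Spec_row_sum n out) := by unfold Spec_row_sum; infer_instance

-- ===== CLAIM (what is proved, stated in full; the proofs are below) =====
def Claim_equal_row_sum : Prop := ∀ (n : Int), Dom_row_sum n → Spec_row_sum n (row_sum n)

-- ===== LEMMAS AND PROOFS =====

-- twice the sum of range(a, a+L) is L*(2a+L-1)
theorem pv_two_range_sum (L : Nat) (a : Int) :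
    2 * (PySem.List.pyRange a (a + L) 1).sum = L * (2 * a + L - 1) := by
  induction L with
  | zero => simp [PySem.List.pyRange_one_eq_nil]
  | succ k ih =>
    have h : a ≤ a + (k : Int) := by omega
    have : (a : Int) + ((k + 1 : Nat) : Int) = (a + k) + 1 := by push_cast; ring
    rw [this, PySem.List.pyRange_one_succ_right h, List.sum_append]
    push_cast
    push_cast at ih
    simp only [List.sum_cons, List.sum_nil]
    ring_nf
    ring_nf at ih
    omega

-- loop invariant: after m iterations the state is (cur, row, length) with
-- 2*cur = m*(m+1)+2, length = m+1, and 2*row = m*(m*m+1) (row = 0 for m = 0)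
theorem pv_loop (m : Nat) :
    2 * ((PySem.List.pyRange 0 m 1).foldl
      (fun (s : Int × Int × Int) (_i : Int) =>
        (s.1 + s.2.2, (PySem.List.pyRange s.1 (s.1 + s.2.2) 1).sum, s.2.2 + 1))
      (1, 0, 1)).1 = (m : Int) * (m + 1) + 2
    ∧ ((PySem.List.pyRange 0 m 1).foldl
      (fun (s : Int × Int × Int) (_i : Int) =>
        (s.1 + s.2.2, (PySem.List.pyRange s.1 (s.1 + s.2.2) 1).sum, s.2.2 + 1))
      (1, 0, 1)).2.2 = (m : Int) + 1
    ∧ 2 * ((PySem.List.pyRange 0 m 1).foldl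
      (fun (s : Int × Int × Int) (_i : Int) =>
        (s.1 + s.2.2, (PySem.List.pyRange s.1 (s.1 + s.2.2) 1).sum, s.2.2 + 1))
      (1, 0, 1)).2.1 = (if m = 0 then 0 else (m : Int) * ((m : Int) * m + 1)) := by
  induction m with
  | zero => simp [PySem.List.pyRange_one_eq_nil]
  | succ k ih =>
    obtain ⟨hc, hl, _⟩ := ih
    have h0 : (0 : Int) ≤ (k : Int) := by omega
    have hk : ((k + 1 : Nat) : Int) = (k : Int) + 1 := by push_cast; ring
    rw [hk, PySem.List.pyRange_one_succ_right h0, List.foldl_append]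
    set t := (PySem.List.pyRange 0 k 1).foldl
      (fun (s : Int × Int × Int) (_i : Int) =>
        (s.1 + s.2.2, (PySem.List.pyRange s.1 (s.1 + s.2.2) 1).sum, s.2.2 + 1))
      (1, 0, 1) with ht
    simp only [List.foldl_cons, List.foldl_nil]
    refine ⟨by push_cast; linear_combination hc + 2 * hl, by push_cast; omega, ?_⟩
    have hs := pv_two_range_sum (k + 1) t.1
    have hcast : (t.1 : Int) + ((k + 1 : Nat) : Int) = t.1 + ((k : Int) + 1) := by push_cast; ring
    rw [hcast] at hs
    have hlen : t.1 + t.2.2 = t.1 + ((k : Int) + 1) := by omega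
    rw [hlen, if_neg (Nat.succ_ne_zero k)]
    push_cast at hs ⊢
    linear_combination hs + ((k : Int) + 1) * hc

-- ===== VERDICT (by name: the statement is the Claim_ definition above) =====
theorem row_sum_spec : Claim_equal_row_sum := by
  intro n _
  unfold Spec_row_sum row_sum row_sum_alt
  by_cases hn : n ≤ 0
  · simp [PySem.List.pyRange_one_eq_nil hn, hn]
  · push_neg at hn
    obtain ⟨m, rfl⟩ : ∃ m : Nat, n = (m : Int) := ⟨n.toNat, by omega⟩
    have hm : m ≠ 0 := by omega
    have h := (pv_loop m).2.2
    simp only [hm, if_false] at h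
    simp only [if_neg (by omega : ¬ (m : Int) ≤ 0)]
    have h2 : PySem.Int.floordiv ((m : Int) * ((m : Int) * m + 1)) 2
        = ((m : Int) * ((m : Int) * m + 1)) / 2 :=
      PySem.Int.floordiv_eq_ediv_of_pos (by omega)
    rw [h2, ← h]
    omega
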